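-- pv_equiv track=rewrite | github.com/epolat380/token | main.py | remove_dup_keys
-- ===== SOURCE A (Python) =====
-- def remove_dup_keys(map1):
--   temp = []
--   res = dict()
--   for key, val in map1.items():
--       if val not in temp:
--           temp.append(val)
--           res[key] = val
--   return res
-- ===== SOURCE B (Python) =====
-- def remove_dup_keys(map1):
--     # Worklist algorithm: repeatedly take the first pending item, keep it,
--     # and filter every later item carrying the same value out of the worklist.
--     pending = list(map1.items())
--     res = dict()
--     while pending:
--         key, val = pending[0]
--         res[key] = val
--         pending = [(k, v) for k, v in pending[1:] if v != val]
--     return res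
-- ===== Notes on version B (the rewrite author's own statement) =====
-- stated objective: alternative
-- what changed: Replaces A's single pass with a seen-values list and inline membership guard by a worklist algorithm that repeatedly commits the first pending item and filters all later items with the same value out of the worklist, so no seen-structure exists at all.
import Mathlib
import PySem

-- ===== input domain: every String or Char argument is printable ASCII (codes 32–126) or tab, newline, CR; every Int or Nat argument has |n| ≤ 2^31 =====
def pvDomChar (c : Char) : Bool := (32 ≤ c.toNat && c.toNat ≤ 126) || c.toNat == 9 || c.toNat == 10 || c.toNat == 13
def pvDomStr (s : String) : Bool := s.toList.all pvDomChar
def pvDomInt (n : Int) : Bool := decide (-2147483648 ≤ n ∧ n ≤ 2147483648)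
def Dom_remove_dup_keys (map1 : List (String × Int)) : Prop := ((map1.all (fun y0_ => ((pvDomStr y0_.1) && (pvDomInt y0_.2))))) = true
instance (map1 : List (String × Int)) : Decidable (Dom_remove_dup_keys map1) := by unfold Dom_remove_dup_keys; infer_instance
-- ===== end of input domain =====

-- B replaces A's one-pass seen-list membership guard by a worklist algorithm that commits
-- the first pending item and filters later items with the same value out of the worklist;
-- alternative structure, equal result.

-- ===== PORT A =====
-- for key, val in map1.items(): if val not in temp: temp.append(val); res[key] = val
def remove_dup_keys (map1 : List (String × Int)) : List (String × Int) :=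
  (map1.foldl
    (fun (st : List Int × PySem.Dict String Int) kv =>
      if st.1.contains kv.2 then st
      else (st.1 ++ [kv.2], st.2.insert kv.1 kv.2))
    ([], PySem.Dict.empty)).2.items

-- ===== PORT B =====
-- while pending: key, val = pending[0]; res[key] = val; pending = [(k,v) for k,v in pending[1:] if v != val]
def rdkWorklist : List (String × Int) → PySem.Dict String Int → PySem.Dict String Int
  | [], res => res
  | (key, val) :: rest, res =>
      rdkWorklist (rest.filter (fun p => p.2 != val)) (res.insert key val)
termination_by pending _ => pending.length
decreasing_by
  simp only [List.length_unattach, List.length_cons]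
  exact Nat.lt_succ_of_le (le_trans (List.length_filter_le _ _) (by simp))

def remove_dup_keys_alt (map1 : List (String × Int)) : List (String × Int) :=
  (rdkWorklist map1 PySem.Dict.empty).items

-- ===== PRECONDITION & SPEC =====
def Spec_remove_dup_keys (map1 : List (String × Int)) (out : List (String × Int)) : Prop := out = remove_dup_keys_alt map1
instance (map1 : List (String × Int)) (out : List (String × Int)) : Decidable (Spec_remove_dup_keys map1 out) := by unfold Spec_remove_dup_keys; infer_instance

-- ===== CLAIM =====
def Claim_equal_remove_dup_keys : Prop := ∀ (map1 : List (String × Int)), Dom_remove_dup_keys map1 → Spec_remove_dup_keys map1 (remove_dup_keys map1)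

-- ===== LEMMAS AND PROOFS =====

-- A's loop from seen-list `temp` equals B's worklist run on the list with already-seen
-- values filtered away.
lemma rdk_main (l : List (String × Int)) (temp : List Int) (res : PySem.Dict String Int) :
    (l.foldl
      (fun (st : List Int × PySem.Dict String Int) kv =>
        if st.1.contains kv.2 then st
        else (st.1 ++ [kv.2], st.2.insert kv.1 kv.2)) (temp, res)).2
    = rdkWorklist (l.filter (fun p => !temp.contains p.2)) res := by
  induction l generalizing temp res with
  | nil => simp only [List.filter_nil, List.foldl_nil]; rw [rdkWorklist]
  | cons kv rest ih =>
    obtain ⟨k, v⟩ := kv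
    by_cases h : temp.contains v = true
    · simp only [List.foldl_cons, List.filter_cons, h, if_pos, Bool.not_true, if_neg,
        Bool.false_eq_true, not_false_iff]
      exact ih temp res
    · have h' : temp.contains v = false := by simpa using h
      simp only [List.foldl_cons, List.filter_cons, h', Bool.not_false, if_pos,
        Bool.false_eq_true, if_neg, not_false_iff]
      rw [ih (temp ++ [v]) (res.insert k v)]
      conv_rhs => rw [rdkWorklist]
      rw [List.filter_filter]
      congr 1
      apply List.filter_congr
      intro p _
      simp only [List.contains_append, Bool.not_or]
      cases hpv : (p.2 != v) <;> cases ht : temp.contains p.2 <;>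
        simp_all [bne]

-- ===== VERDICT =====
theorem remove_dup_keys_spec : Claim_equal_remove_dup_keys := by
  intro map1 _
  unfold Spec_remove_dup_keys remove_dup_keys remove_dup_keys_alt
  rw [rdk_main map1 [] PySem.Dict.empty]
  congr 1
  simp
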